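-- pv_equiv track=rewrite | github.com/SoorajTomar/Ciphers-and-Encryption-Methods | S_DES_Decryption.py | ip
-- ===== SOURCE A (Python) =====
-- def ip(p):
--     a=list(p)
--     l=['0' for i in range(8)]
--     l[0] = a[1]
--     l[1] = a[5]
--     l[2] = a[2]
--     l[3] = a[0]
--     l[4] = a[3]
--     l[5] = a[7]
--     l[6] = a[4]
--     l[7] = a[6]
--     return l
-- ===== SOURCE B (Python) =====
-- # B: instead of writing into fixed output slots, tag each of the 8 input bits
-- # with its destination position and sort by that destination; the sort
-- # reassembles the permuted block.
-- _DEST = (3, 0, 2, 4, 6, 1, 7, 5)  # destination of source bit i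
--
-- def ip(p):
--     tagged = sorted(((d, p[i]) for i, d in enumerate(_DEST)), key=lambda t: t[0])
--     return [x for _, x in tagged]
-- ===== Notes on version B (the rewrite author's own statement) =====
-- stated objective: alternative
-- what changed: instead of assigning each output slot from a hardcoded source index, B tags every input bit with its destination position and reassembles the block by sorting on that tag (scatter-by-sort instead of gather-by-index)
import Mathlib
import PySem

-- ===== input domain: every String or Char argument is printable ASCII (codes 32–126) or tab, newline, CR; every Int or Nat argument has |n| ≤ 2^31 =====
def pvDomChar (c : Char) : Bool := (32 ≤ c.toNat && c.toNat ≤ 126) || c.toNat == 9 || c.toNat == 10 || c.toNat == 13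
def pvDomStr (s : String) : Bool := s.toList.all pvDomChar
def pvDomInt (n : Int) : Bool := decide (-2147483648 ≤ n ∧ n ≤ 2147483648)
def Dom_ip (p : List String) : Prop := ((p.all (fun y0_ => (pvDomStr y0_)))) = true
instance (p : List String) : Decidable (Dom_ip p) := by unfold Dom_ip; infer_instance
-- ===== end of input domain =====

-- B reassembles the permuted block by tagging each input bit with its destination and sorting on the tag, instead of A's slot-by-slot assignments; equal on lists of length ≥ 8.

-- ===== PORT A =====
-- a[i] is ported as (pyGet? a i).getD "0": exact wherever Python does not raise, i.e. on Pre_ip.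
def ip (p : List String) : List String :=
  let a := p
  let l := List.replicate 8 "0"
  let l := l.set 0 ((PySem.List.pyGet? a 1).getD "0")
  let l := l.set 1 ((PySem.List.pyGet? a 5).getD "0")
  let l := l.set 2 ((PySem.List.pyGet? a 2).getD "0")
  let l := l.set 3 ((PySem.List.pyGet? a 0).getD "0")
  let l := l.set 4 ((PySem.List.pyGet? a 3).getD "0")
  let l := l.set 5 ((PySem.List.pyGet? a 7).getD "0")
  let l := l.set 6 ((PySem.List.pyGet? a 4).getD "0")
  let l := l.set 7 ((PySem.List.pyGet? a 6).getD "0")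
  l

-- ===== PORT B =====
def ipDest : List Int := [3, 0, 2, 4, 6, 1, 7, 5]

def ip_alt (p : List String) : List String :=
  let tagged := PySem.List.sorted
    ((PySem.List.enumerate ipDest).map
      (fun e => (e.2, (PySem.List.pyGet? p e.1).getD "0")))
    (fun t => t.1) false
  tagged.map (fun t => t.2)

-- ===== PRECONDITION & SPEC =====
-- Pre_ excludes lists shorter than 8, on which Python A raises IndexError.
def Pre_ip (p : List String) : Prop := 8 ≤ p.length
instance (p : List String) : Decidable (Pre_ip p) := by unfold Pre_ip; infer_instance
def pvWitness_ip : List String := ["1", "0", "1", "1", "0", "0", "1", "0"]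

def Spec_ip (p : List String) (out : List String) : Prop := out = ip_alt p
instance (p : List String) (out : List String) : Decidable (Spec_ip p out) := by unfold Spec_ip; infer_instance

-- ===== CLAIM (what is proved, stated in full; the proofs are below) =====
def Claim_equal_ip : Prop := ∀ (p : List String), Dom_ip p → Pre_ip p → Spec_ip p (ip p)

-- ===== LEMMAS AND PROOFS =====

-- ===== VERDICT (by name: the statement is the Claim_ definition above) =====
theorem ip_spec : Claim_equal_ip := by
  intro p _ hpre
  unfold Pre_ip at hpre
  match p, hpre with
  | x0 :: x1 :: x2 :: x3 :: x4 :: x5 :: x6 :: x7 :: t, _ =>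
    have g0 : PySem.List.pyGet? (x0 :: x1 :: x2 :: x3 :: x4 :: x5 :: x6 :: x7 :: t) 0 = some x0 := by
      simp only [PySem.List.pyGet?, PySem.List.pyIdx?]
      split_ifs <;> first | (exfalso; omega) | simp
    have g1 : PySem.List.pyGet? (x0 :: x1 :: x2 :: x3 :: x4 :: x5 :: x6 :: x7 :: t) 1 = some x1 := by
      simp only [PySem.List.pyGet?, PySem.List.pyIdx?]
      split_ifs <;> first | (exfalso; omega) | simp
    have g2 : PySem.List.pyGet? (x0 :: x1 :: x2 :: x3 :: x4 :: x5 :: x6 :: x7 :: t) 2 = some x2 := by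
      simp only [PySem.List.pyGet?, PySem.List.pyIdx?]
      split_ifs <;> first | (exfalso; omega) | simp
    have g3 : PySem.List.pyGet? (x0 :: x1 :: x2 :: x3 :: x4 :: x5 :: x6 :: x7 :: t) 3 = some x3 := by
      simp only [PySem.List.pyGet?, PySem.List.pyIdx?]
      split_ifs <;> first | (exfalso; omega) | simp
    have g4 : PySem.List.pyGet? (x0 :: x1 :: x2 :: x3 :: x4 :: x5 :: x6 :: x7 :: t) 4 = some x4 := by
      simp only [PySem.List.pyGet?, PySem.List.pyIdx?]
      split_ifs <;> first | (exfalso; omega) | simp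
    have g5 : PySem.List.pyGet? (x0 :: x1 :: x2 :: x3 :: x4 :: x5 :: x6 :: x7 :: t) 5 = some x5 := by
      simp only [PySem.List.pyGet?, PySem.List.pyIdx?]
      split_ifs <;> first | (exfalso; omega) | simp
    have g6 : PySem.List.pyGet? (x0 :: x1 :: x2 :: x3 :: x4 :: x5 :: x6 :: x7 :: t) 6 = some x6 := by
      simp only [PySem.List.pyGet?, PySem.List.pyIdx?]
      split_ifs <;> first | (exfalso; omega) | simp
    have g7 : PySem.List.pyGet? (x0 :: x1 :: x2 :: x3 :: x4 :: x5 :: x6 :: x7 :: t) 7 = some x7 := by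
      simp only [PySem.List.pyGet?, PySem.List.pyIdx?]
      split_ifs <;> first | (exfalso; omega) | simp
    have hB : ip_alt (x0 :: x1 :: x2 :: x3 :: x4 :: x5 :: x6 :: x7 :: t)
        = [x1, x5, x2, x0, x3, x7, x4, x6] := by
      simp [ip_alt, ipDest, PySem.List.enumerate, g0, g1, g2, g3, g4, g5, g6, g7,
        PySem.List.sorted_eq_foldl_insertBy, PySem.List.insertBy]
    unfold Spec_ip ip
    rw [hB]
    simp [g0, g1, g2, g3, g4, g5, g6, g7, List.set]
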